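-- pv_equiv track=rewrite | github.com/mehmetsefa2644/Ec2Instance | topologicalsort.py | sort_topologically
-- ===== SOURCE A (Python) =====
-- from collections import defaultdict
-- from itertools import takewhile, count
--
-- def sort_topologically(graph):
--     levels = {}
--     names = defaultdict(set)
--
--     def df(a):
--         if a in levels:
--             return levels[a]
--         children = graph.get(a, None)
--         level = 0 if not children else (1 + max(df(lname) for lname in children))
--         levels[a] = level
--         names[level].add(a)
--         return level
--
--     for a in graph:
--         df(a)
--
--     return list(takewhile(lambda x: x is not None, (names.get(i, None) for i in count())))
-- ===== SOURCE B (Python) =====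
-- def sort_topologically(graph):
--     # Iterative two-phase (expand/finalize) explicit-stack DFS instead of A's
--     # memoized recursion; same traversal order, no Python recursion.
--     levels = {}
--     names = {}
--     for root in graph:
--         stack = [(root, False)]
--         while stack:
--             a, ready = stack.pop()
--             if a in levels:
--                 continue
--             children = graph.get(a)
--             if not children:
--                 levels[a] = 0
--                 names.setdefault(0, set()).add(a)
--             elif ready:
--                 lvl = 1 + max(levels[c] for c in children)
--                 levels[a] = lvl
--                 names.setdefault(lvl, set()).add(a)
--             else:
--                 stack.append((a, True))
--                 stack.extend((c, False) for c in reversed(children))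
--     out = []
--     i = 0
--     while i in names:
--         out.append(names[i])
--         i += 1
--     return out
-- ===== Notes on version B (the rewrite author's own statement) =====
-- stated objective: alternative
-- what changed: A's memoized recursive DFS (nested df with Python recursion) is replaced by an iterative two-phase explicit-stack DFS (expand/finalize entries, Kahn-style bottom-up level computation on the stack) that visits nodes in the same order without recursion, so it is immune to Python's recursion limit on deep graphs.
import Mathlib
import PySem

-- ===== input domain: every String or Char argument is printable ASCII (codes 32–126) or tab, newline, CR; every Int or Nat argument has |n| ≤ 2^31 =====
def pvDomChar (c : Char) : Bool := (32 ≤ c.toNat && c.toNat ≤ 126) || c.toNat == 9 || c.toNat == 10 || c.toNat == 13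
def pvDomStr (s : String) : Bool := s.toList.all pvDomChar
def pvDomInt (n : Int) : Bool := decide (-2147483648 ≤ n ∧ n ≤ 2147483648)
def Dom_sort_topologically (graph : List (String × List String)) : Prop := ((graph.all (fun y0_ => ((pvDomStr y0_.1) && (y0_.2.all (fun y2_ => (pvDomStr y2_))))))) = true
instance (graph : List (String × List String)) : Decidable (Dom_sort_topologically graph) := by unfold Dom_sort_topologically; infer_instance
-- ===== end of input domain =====

-- B replaces A's memoized recursive DFS by an iterative explicit-stack two-phase DFS
-- (same traversal order, no recursion); equivalence is claimed on acyclic graphs (Pre_),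
-- where the Python A returns instead of raising RecursionError.

-- ===== PORT A =====
-- state: (levels : dict str->int, names : dict int->set str)
-- fuel-indexed port of the nested recursive 'df' (none = fuel exhausted; under Pre_
-- the fuel passed by sort_topologically is proved sufficient, so none never arises there)
mutual
def dfA (g : PySem.Dict String (List String)) :
    Nat → String → (PySem.Dict String Int × PySem.Dict Int (PySem.Set String)) →
    Option (Int × (PySem.Dict String Int × PySem.Dict Int (PySem.Set String)))
  | 0, _, _ => none
  | f+1, a, st =>
    match st.1.get? a with
    | some l => some (l, st)                                  -- if a in levels: return levels[a]
    | none =>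
      let children := g.getD a []                             -- graph.get(a, None); None and [] both falsy
      if children.isEmpty then
        some (0, (st.1.insert a 0, st.2.insert 0 ((st.2.getD 0 PySem.Set.empty).add a)))
      else
        match dfAList g f children st with                    -- df(lname) for lname in children
        | none => none
        | some (vals, st') =>
          let lvl := 1 + (PySem.List.max? vals (fun v => v)).getD 0   -- 1 + max(...); vals ≠ [] here
          some (lvl, (st'.1.insert a lvl, st'.2.insert lvl ((st'.2.getD lvl PySem.Set.empty).add a)))
  termination_by f _ _ => (f, 0)

def dfAList (g : PySem.Dict String (List String)) :
    Nat → List String → (PySem.Dict String Int × PySem.Dict Int (PySem.Set String)) →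
    Option (List Int × (PySem.Dict String Int × PySem.Dict Int (PySem.Set String)))
  | _, [], st => some ([], st)
  | f, c :: cs, st =>
    match dfA g f c st with
    | none => none
    | some (v, st') =>
      match dfAList g f cs st' with
      | none => none
      | some (vs, st'') => some (v :: vs, st'')
  termination_by f cs _ => (f, cs.length + 1)
end

-- list(takewhile(lambda x: x is not None, (names.get(i, None) for i in count())))
def collectA (nm : PySem.Dict Int (PySem.Set String)) : Nat → Int → List (List String)
  | 0, _ => []
  | f+1, i =>
    match nm.get? i with
    | none => []
    | some s => s :: collectA nm f (i + 1)

def sort_topologically (graph : List (String × List String)) : List (List String) :=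
  let g := PySem.Dict.ofList graph
  let fuel := (PySem.List.dedup (g.keys ++ g.values.flatten)).length + 2
  let st := g.keys.foldl
    (fun st a => match dfA g fuel a st with | some r => r.2 | none => st)
    (PySem.Dict.empty, PySem.Dict.empty)
  collectA st.2 (st.2.size + 1) 0

-- ===== PORT B =====
-- the while-loop over the explicit stack; fuel is spent only when the stack grows
-- (an expansion), so exhaustion (none) is impossible on acyclic input
def loopB (g : PySem.Dict String (List String)) :
    List (String × Bool) → Nat →
    (PySem.Dict String Int × PySem.Dict Int (PySem.Set String)) →
    Option (PySem.Dict String Int × PySem.Dict Int (PySem.Set String))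
  | [], _, st => some st
  | (a, ready) :: rest, f, st =>
    if (st.1.get? a).isSome then loopB g rest f st            -- if a in levels: continue
    else
      let children := g.getD a []
      if children.isEmpty then
        loopB g rest f (st.1.insert a 0, st.2.insert 0 ((st.2.getD 0 PySem.Set.empty).add a))
      else if ready then
        let lvl := 1 + (PySem.List.max? (children.map (fun c => st.1.getD c 0)) (fun v => v)).getD 0
        loopB g rest f (st.1.insert a lvl, st.2.insert lvl ((st.2.getD lvl PySem.Set.empty).add a))
      else
        match f with
        | 0 => none
        | f+1 => loopB g (children.map (fun c => (c, false)) ++ (a, true) :: rest) f st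
  termination_by stack f _ => (f, stack.length)

-- while i in names: out.append(names[i]); i += 1
def collectB (nm : PySem.Dict Int (PySem.Set String)) : Nat → Int → List (List String)
  | 0, _ => []
  | f+1, i =>
    if nm.contains i then nm.getD i PySem.Set.empty :: collectB nm f (i + 1)
    else []

def sort_topologically_alt (graph : List (String × List String)) : List (List String) :=
  let g := PySem.Dict.ofList graph
  let fuel := (PySem.List.dedup (g.keys ++ g.values.flatten)).length + 1
  let st := g.keys.foldl
    (fun st a => (loopB g [(a, false)] fuel st).getD st)
    (PySem.Dict.empty, PySem.Dict.empty)
  collectB st.2 (st.2.size + 1) 0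

-- ===== PRECONDITION & SPEC =====
-- reachN g n c: every node reachable from c by a path of at most n edges is a member
def reachStep (g : PySem.Dict String (List String)) (s : List String) : List String :=
  PySem.List.dedup (s ++ s.flatMap (fun x => g.getD x []))
def reachN (g : PySem.Dict String (List String)) (n : Nat) (c : String) : List String :=
  (reachStep g)^[n] [c]

-- Pre_ excludes exactly the cyclic graphs: on a graph with a cycle the Python A's
-- recursive df never terminates (RecursionError), so A returns only on acyclic input.
def Pre_sort_topologically (graph : List (String × List String)) : Prop :=
  ∀ a ∈ (PySem.Dict.ofList graph).keys,
    ∀ c ∈ (PySem.Dict.ofList graph).getD a [],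
      a ∉ reachN (PySem.Dict.ofList graph) ((PySem.Dict.ofList graph).size + 1) c

instance (graph : List (String × List String)) : Decidable (Pre_sort_topologically graph) := by
  unfold Pre_sort_topologically; infer_instance

def pvWitness_sort_topologically : (List (String × List String)) :=
  [("a", ["b", "c"]), ("b", ["c"]), ("c", [])]

def Spec_sort_topologically (graph : List (String × List String)) (out : List (List String)) : Prop := out = sort_topologically_alt graph
instance (graph : List (String × List String)) (out : List (List String)) : Decidable (Spec_sort_topologically graph out) := by unfold Spec_sort_topologically; infer_instance

-- ===== CLAIM (what is proved, stated in full; the proofs are below) =====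
def Claim_equal_sort_topologically : Prop := ∀ (graph : List (String × List String)), Dom_sort_topologically graph → Pre_sort_topologically graph → Spec_sort_topologically graph (sort_topologically graph)

-- ===== LEMMAS AND PROOFS =====

-- abbreviations used only by the proofs
abbrev pvSt := PySem.Dict String Int × PySem.Dict Int (PySem.Set String)

def pvEdge (g : PySem.Dict String (List String)) (x y : String) : Prop := y ∈ g.getD x []

def pvLast (a : String) (l : List String) : String := (a :: l).getLast (List.cons_ne_nil _ _)

-- every edge-chain starting at a has at most f edges
-- pvChain g a l: l is a walk a -> l0 -> l1 -> ... along edges of g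
def pvChain (g : PySem.Dict String (List String)) : String → List String → Prop
  | _, [] => True
  | a, y :: l => pvEdge g a y ∧ pvChain g y l

def pvBnd (g : PySem.Dict String (List String)) : Nat → String → Prop
  | 0, a => g.getD a [] = []
  | f+1, a => ∀ c ∈ g.getD a [], pvBnd g f c

def pvPreG (g : PySem.Dict String (List String)) : Prop :=
  ∀ a ∈ g.keys, ∀ c ∈ g.getD a [], a ∉ reachN g (g.size + 1) c

theorem pvLast_nil (a : String) : pvLast a [] = a := rfl

theorem pvLast_cons (a y : String) (l : List String) : pvLast a (y :: l) = pvLast y l := by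
  simp [pvLast, List.getLast_cons]

theorem pvLast_concat (a x : String) (m : List String) : pvLast a (m ++ [x]) = x := by
  simp [pvLast]

-- ---- reachability lemmas ----

theorem pv_subset_reachStep (g : PySem.Dict String (List String)) (s : List String) :
    s ⊆ reachStep g s := by
  intro x hx
  simp only [reachStep, PySem.List.mem_dedup, List.mem_append]
  exact Or.inl hx

theorem pv_reachStep_mono (g : PySem.Dict String (List String)) {s t : List String}
    (h : s ⊆ t) : reachStep g s ⊆ reachStep g t := by
  intro x hx
  simp only [reachStep, PySem.List.mem_dedup, List.mem_append, List.mem_flatMap] at hx ⊢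
  rcases hx with hx | ⟨y, hy, hxy⟩
  · exact Or.inl (h hx)
  · exact Or.inr ⟨y, h hy, hxy⟩

theorem pv_mem_reachStep (g : PySem.Dict String (List String)) {s : List String} {x y : String}
    (hx : x ∈ s) (hy : y ∈ g.getD x []) : y ∈ reachStep g s := by
  simp only [reachStep, PySem.List.mem_dedup, List.mem_append, List.mem_flatMap]
  exact Or.inr ⟨x, hx, hy⟩

theorem pv_iter_mono (g : PySem.Dict String (List String)) (n : Nat) {s t : List String}
    (h : s ⊆ t) : (reachStep g)^[n] s ⊆ (reachStep g)^[n] t := by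
  induction n generalizing s t with
  | zero => simpa using h
  | succ n ih =>
    rw [Function.iterate_succ_apply, Function.iterate_succ_apply]
    exact ih (pv_reachStep_mono g h)

theorem pv_subset_iter (g : PySem.Dict String (List String)) (n : Nat) (s : List String) :
    s ⊆ (reachStep g)^[n] s := by
  induction n generalizing s with
  | zero => simp
  | succ n ih =>
    rw [Function.iterate_succ_apply]
    exact fun x hx => ih _ (pv_subset_reachStep g s hx)

theorem pv_chain_reach (g : PySem.Dict String (List String)) :
    ∀ (l : List String) (c : String) (n : Nat), pvChain g c l → l.length ≤ n →
      pvLast c l ∈ reachN g n c := by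
  intro l
  induction l with
  | nil =>
    intro c n _ _
    exact pv_subset_iter g n [c] (List.mem_singleton_self c)
  | cons y l ih =>
    intro c n hch hlen
    obtain ⟨hedge, hch'⟩ := hch
    cases n with
    | zero => simp at hlen
    | succ n =>
      rw [pvLast_cons]
      have h1 : pvLast y l ∈ reachN g n y := ih y n hch' (by simpa using Nat.lt_succ_iff.mp (Nat.lt_of_lt_of_le (Nat.lt_succ_self _) (by simpa using hlen)))
      have h2 : [y] ⊆ reachStep g [c] :=
        fun z hz => by
          rw [List.mem_singleton] at hz; subst hz
          exact pv_mem_reachStep g (List.mem_singleton_self c) hedge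
      have h3 : (reachStep g)^[n] [y] ⊆ (reachStep g)^[n] (reachStep g [c]) := by
        intro z hz
        exact pv_iter_mono g n h2 (by simpa using hz)
      have := h3 h1
      rw [← Function.iterate_succ_apply] at this
      exact this

-- ---- cycles contradict Pre_ ----

theorem pv_keys_of_edge (g : PySem.Dict String (List String)) {x y : String}
    (h : y ∈ g.getD x []) : x ∈ g.keys := by
  by_contra hk
  have hc : g.contains x = false := by
    cases hcx : g.contains x
    · rfl
    · exact absurd ((PySem.Dict.contains_iff_mem_keys g x).mp hcx) hk
  have hn : g.get? x = none := by
    rw [PySem.Dict.get?_eq_none_iff_not_mem_keys]; exact hk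
  rw [PySem.Dict.getD_eq_get?_getD, hn] at h
  simp at h

theorem pv_cycle_absurd (g : PySem.Dict String (List String)) (hpre : pvPreG g) {x : String}
    {l : List String} (hch : pvChain g x l) (hne : l ≠ [])
    (hlast : pvLast x l = x) (hlen : l.length ≤ g.size + 2) : False := by
  match l, hne with
  | c :: l₂, _ =>
    obtain ⟨hedge, hch₂⟩ := hch
    have hx : x ∈ g.keys := pv_keys_of_edge g (by simpa [pvEdge] using hedge)
    rw [pvLast_cons] at hlast
    have hr : pvLast c l₂ ∈ reachN g (g.size + 1) c :=
      pv_chain_reach g l₂ c (g.size + 1) hch₂ (by simp at hlen; omega)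
    rw [hlast] at hr
    exact hpre x hx c (by simpa [pvEdge] using hedge) hr

theorem pv_split_of_not_nodup {α : Type} : ∀ (L : List α), ¬ L.Nodup →
    ∃ (p : List α) (x : α) (m s : List α), L = p ++ x :: m ++ x :: s := by
  intro L
  induction L with
  | nil => intro h; exact absurd List.nodup_nil h
  | cons y t ih =>
    intro h
    by_cases hy : y ∈ t
    · obtain ⟨m, s, rfl⟩ := List.append_of_mem hy
      exact ⟨[], y, m, s, rfl⟩
    · have ht : ¬ t.Nodup := fun hn => h (List.nodup_cons.mpr ⟨hy, hn⟩)
      obtain ⟨p, x, m, s, rfl⟩ := ih ht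
      exact ⟨y :: p, x, m, s, rfl⟩

theorem pv_chain_split (g : PySem.Dict String (List String)) :
    ∀ (u : List String) (a x : String) (w : List String),
      pvChain g a (u ++ x :: w) → pvChain g x w := by
  intro u
  induction u with
  | nil => intro a x w h; exact h.2
  | cons b u ih => intro a x w h; exact ih b x w h.2

theorem pv_chain_take (g : PySem.Dict String (List String)) :
    ∀ (u : List String) (a : String) (w : List String),
      pvChain g a (u ++ w) → pvChain g a u := by
  intro u
  induction u with
  | nil => intro a w _; trivial
  | cons b u ih => intro a w h; exact ⟨h.1, ih b w h.2⟩

theorem pv_chain_extract (g : PySem.Dict String (List String)) {a : String} {L u m w : List String}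
    {x : String} (hch : pvChain g a L) (he : a :: L = u ++ x :: m ++ x :: w) :
    pvChain g x (m ++ [x]) := by
  cases u with
  | nil =>
    rw [List.nil_append, List.cons_append] at he
    have h1 := (List.cons_eq_cons.mp he).1
    have h2 := (List.cons_eq_cons.mp he).2
    rw [h2, h1] at hch
    exact pv_chain_take g (m ++ [x]) x w (by simpa using hch)
  | cons b u =>
    rw [List.cons_append] at he
    have h2 := (List.cons_eq_cons.mp he).2
    rw [h2] at hch
    have hch' : pvChain g a (u ++ x :: (m ++ x :: w)) := by
      simpa [List.append_assoc] using hch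
    have h1 : pvChain g x (m ++ x :: w) := pv_chain_split g u a x (m ++ x :: w) hch'
    exact pv_chain_take g (m ++ [x]) x w (by simpa using h1)

theorem pv_chain_out (g : PySem.Dict String (List String)) :
    ∀ (l : List String) (a : String), pvChain g a l →
      ∀ x ∈ (a :: l).dropLast, g.getD x [] ≠ [] := by
  intro l
  induction l with
  | nil => intro a _ x hx; simp at hx
  | cons y t ih =>
    intro a hch x hx
    rw [show ((a :: y :: t).dropLast) = a :: (y :: t).dropLast from rfl] at hx
    rcases List.mem_cons.mp hx with rfl | hx'
    · intro hemp
      have := hch.1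
      simp [pvEdge, hemp] at this
    · exact ih y hch.2 x hx'

theorem pv_notBnd_chain (g : PySem.Dict String (List String)) :
    ∀ (f : Nat) (a : String), ¬ pvBnd g f a →
      ∃ l, pvChain g a l ∧ l.length = f + 1 := by
  intro f
  induction f with
  | zero =>
    intro a h
    simp only [pvBnd] at h
    obtain ⟨c, hc⟩ := List.exists_mem_of_ne_nil _ h
    exact ⟨[c], ⟨hc, trivial⟩, rfl⟩
  | succ f ih =>
    intro a h
    simp only [pvBnd] at h
    push Not at h
    obtain ⟨c, hc, hb⟩ := h
    obtain ⟨l, hch, hlen⟩ := ih c hb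
    exact ⟨c :: l, ⟨hc, hch⟩, by simp [hlen]⟩

theorem pv_keys_len {ν : Type} (g : PySem.Dict String ν) : g.keys.length = g.size := by
  simp [PySem.Dict.keys, PySem.Dict.size]

theorem pv_bnd_all (g : PySem.Dict String (List String)) (hpre : pvPreG g)
    (a : String) : pvBnd g g.size a := by
  by_contra h
  obtain ⟨l, hch, hlen⟩ := pv_notBnd_chain g g.size a h
  have hlenL : ((a :: l).dropLast).length = g.size + 1 := by
    simp [hlen]
  have hmem : ∀ x ∈ (a :: l).dropLast, x ∈ g.keys := by
    intro x hx
    have hne := pv_chain_out g l a hch x hx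
    obtain ⟨y, hy⟩ := List.exists_mem_of_ne_nil _ hne
    exact pv_keys_of_edge g hy
  have hnodup : ¬ ((a :: l).dropLast).Nodup := by
    intro hnd'
    have := (List.Nodup.subperm hnd' hmem).length_le
    rw [hlenL, pv_keys_len] at this
    omega
  obtain ⟨p, x, m, s', hsplit⟩ := pv_split_of_not_nodup _ hnodup
  obtain ⟨z, hz⟩ : ∃ z, ((a :: l).dropLast) ++ [z] = a :: l :=
    ⟨_, List.dropLast_append_getLast (by simp)⟩
  have hgl : a :: l = p ++ x :: m ++ x :: (s' ++ [z]) := by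
    rw [← hz, hsplit]
    simp [List.append_assoc]
  have hcyc := pv_chain_extract g hch hgl
  have hml : m.length ≤ g.size := by
    have hc := congrArg List.length hsplit
    rw [hlenL] at hc
    simp [List.length_append] at hc
    omega
  exact pv_cycle_absurd g hpre hcyc (by simp) (pvLast_concat x x m) (by simp; omega)

-- ---- properties of the A port ----

-- nodes that can ever carry a level
def pvNodes (g : PySem.Dict String (List String)) : List String :=
  PySem.List.dedup (g.keys ++ g.values.flatten)

def pvPA (g : PySem.Dict String (List String)) (f : Nat) (a : String) (st : pvSt)
    (v : Int) (st' : pvSt) : Prop :=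
  (∀ k w, st.1.get? k = some w → st'.1.get? k = some w)
  ∧ st'.1.get? a = some v
  ∧ st.1.size ≤ st'.1.size
  ∧ (∀ k, st.1.get? k = none → st'.1.get? k ≠ none → k = a ∨ k ∈ g.values.flatten)
  ∧ (∀ k, st.1.get? k = none → st'.1.get? k ≠ none →
      ∃ l, pvChain g a l ∧ l.length < f ∧ pvLast a l = k)
  ∧ (st.1.keys.Nodup → st'.1.keys.Nodup)

def pvPL (g : PySem.Dict String (List String)) (f : Nat) (cs : List String) (st : pvSt)
    (vs : List Int) (st' : pvSt) : Prop :=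
  (∀ k w, st.1.get? k = some w → st'.1.get? k = some w)
  ∧ vs = cs.map (fun c => st'.1.getD c 0)
  ∧ st.1.size ≤ st'.1.size
  ∧ (∀ k, st.1.get? k = none → st'.1.get? k ≠ none → k ∈ cs ∨ k ∈ g.values.flatten)
  ∧ (∀ k, st.1.get? k = none → st'.1.get? k ≠ none →
      ∃ c ∈ cs, ∃ l, pvChain g c l ∧ l.length < f ∧ pvLast c l = k)
  ∧ (st.1.keys.Nodup → st'.1.keys.Nodup)

theorem pv_mem_flatten_of_get? (g : PySem.Dict String (List String)) {a : String}
    {cs : List String} (h : g.get? a = some cs) {c : String} (hc : c ∈ cs) :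
    c ∈ g.values.flatten := by
  have hit := PySem.Dict.mem_items_of_get?_eq_some g h
  refine List.mem_flatten.mpr ⟨cs, ?_, hc⟩
  simp only [PySem.Dict.values]
  exact List.mem_map.mpr ⟨(a, cs), hit, rfl⟩

theorem pv_size_insert_ge (d : PySem.Dict String Int) (k : String) (v : Int) :
    d.size ≤ (d.insert k v).size := by
  rw [PySem.Dict.size_insert]
  split <;> omega

theorem pv_size_insert_new (d : PySem.Dict String Int) {k : String} (v : Int)
    (h : d.get? k = none) : (d.insert k v).size = d.size + 1 := by
  rw [PySem.Dict.size_insert, if_neg]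
  rw [(PySem.Dict.get?_eq_none_iff_contains d k).mp h]
  simp

theorem pv_getD_of_ne_empty (g : PySem.Dict String (List String)) {a : String}
    (h : ¬ (g.getD a []).isEmpty = true) : g.get? a = some (g.getD a []) := by
  cases hq : g.get? a with
  | some cs => rw [PySem.Dict.getD_eq_get?_getD, hq]; rfl
  | none =>
    rw [PySem.Dict.getD_eq_get?_getD, hq] at h
    simp at h

theorem pvA_main (g : PySem.Dict String (List String)) : ∀ (f : Nat),
    (∀ a st v st', dfA g f a st = some (v, st') → pvPA g f a st v st')
    ∧ (∀ cs st vs st', dfAList g f cs st = some (vs, st') → pvPL g f cs st vs st') := by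
  intro f
  induction f with
  | zero =>
    constructor
    · intro a st v st' hsome
      rw [dfA] at hsome
      exact absurd hsome (by simp)
    · intro cs st vs st' hsome
      cases cs with
      | nil =>
        rw [dfAList] at hsome
        simp only [Option.some.injEq, Prod.mk.injEq] at hsome
        obtain ⟨rfl, rfl⟩ := hsome
        exact ⟨fun k w h => h, by simp, le_refl _, fun k h1 h2 => absurd h1 h2,
          fun k h1 h2 => absurd h1 h2, id⟩
      | cons c cs =>
        rw [dfAList] at hsome
        rw [show dfA g 0 c st = none from by rw [dfA]] at hsome
        simp at hsome
  | succ f ih =>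
    have hA : ∀ a st v st', dfA g (f+1) a st = some (v, st') → pvPA g (f+1) a st v st' := by
      intro a st v st' hsome
      rw [dfA] at hsome
      cases hget : st.1.get? a with
      | some l =>
        rw [hget] at hsome
        simp only [Option.some.injEq, Prod.mk.injEq] at hsome
        obtain ⟨rfl, rfl⟩ := hsome
        exact ⟨fun k w h => h, hget, le_refl _, fun k h1 h2 => absurd h1 h2,
          fun k h1 h2 => absurd h1 h2, id⟩
      | none =>
        rw [hget] at hsome
        by_cases hemp : (g.getD a []).isEmpty = true
        · rw [if_pos hemp] at hsome
          simp only [Option.some.injEq, Prod.mk.injEq] at hsome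
          obtain ⟨hv, hst⟩ := hsome
          subst hv
          refine ⟨?_, ?_, ?_, ?_, ?_, ?_⟩
          · intro k w h
            rw [← hst]
            dsimp only
            rw [PySem.Dict.get?_insert]
            split
            · next he => rw [he] at h; rw [hget] at h; exact absurd h (by simp)
            · exact h
          · rw [← hst]; exact PySem.Dict.get?_insert_self st.1 a 0
          · rw [← hst]; exact pv_size_insert_ge st.1 a 0
          · intro k h1 h2
            rw [← hst] at h2
            dsimp only at h2
            rw [PySem.Dict.get?_insert] at h2
            by_cases hk : k = a
            · exact Or.inl hk
            · rw [if_neg hk] at h2; exact absurd h1 h2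
          · intro k h1 h2
            rw [← hst] at h2
            dsimp only at h2
            rw [PySem.Dict.get?_insert] at h2
            by_cases hk : k = a
            · exact ⟨[], trivial, Nat.succ_pos f, by rw [pvLast_nil, hk]⟩
            · rw [if_neg hk] at h2; exact absurd h1 h2
          · intro hnd
            rw [← hst]
            exact PySem.Dict.nodup_keys_insert st.1 a 0 hnd
        · rw [if_neg hemp] at hsome
          cases hlist : dfAList g f (g.getD a []) st with
          | none => rw [hlist] at hsome; exact absurd hsome (by simp)
          | some r =>
            obtain ⟨vals, stf⟩ := r
            rw [hlist] at hsome
            simp only [Option.some.injEq, Prod.mk.injEq] at hsome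
            obtain ⟨hv, hst⟩ := hsome
            obtain ⟨pers, hmap, hsz, hnode, hchain, hndk⟩ := ih.2 (g.getD a []) st vals stf hlist
            have hga : g.get? a = some (g.getD a []) := pv_getD_of_ne_empty g hemp
            refine ⟨?_, ?_, ?_, ?_, ?_, ?_⟩
            · intro k w h
              rw [← hst]
              dsimp only
              rw [PySem.Dict.get?_insert]
              split
              · next he => rw [he] at h; rw [hget] at h; exact absurd h (by simp)
              · exact pers k w h
            · rw [← hst, ← hv]; exact PySem.Dict.get?_insert_self stf.1 a _
            · rw [← hst]
              exact le_trans hsz (pv_size_insert_ge stf.1 a _)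
            · intro k h1 h2
              rw [← hst] at h2
              dsimp only at h2
              rw [PySem.Dict.get?_insert] at h2
              by_cases hk : k = a
              · exact Or.inl hk
              · rw [if_neg hk] at h2
                rcases hnode k h1 h2 with hm | hm
                · exact Or.inr (pv_mem_flatten_of_get? g hga hm)
                · exact Or.inr hm
            · intro k h1 h2
              rw [← hst] at h2
              dsimp only at h2
              rw [PySem.Dict.get?_insert] at h2
              by_cases hk : k = a
              · exact ⟨[], trivial, Nat.succ_pos f, by rw [pvLast_nil, hk]⟩
              · rw [if_neg hk] at h2
                obtain ⟨c, hcmem, l, hch, hlen, hlast⟩ := hchain k h1 h2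
                exact ⟨c :: l, ⟨hcmem, hch⟩, by simp only [List.length_cons]; omega,
                  by rw [pvLast_cons]; exact hlast⟩
            · intro hnd
              rw [← hst]
              exact PySem.Dict.nodup_keys_insert stf.1 a _ (hndk hnd)
    refine ⟨hA, ?_⟩
    intro cs
    induction cs with
    | nil =>
      intro st vs st' hsome
      rw [dfAList] at hsome
      simp only [Option.some.injEq, Prod.mk.injEq] at hsome
      obtain ⟨rfl, rfl⟩ := hsome
      exact ⟨fun k w h => h, by simp, le_refl _, fun k h1 h2 => absurd h1 h2,
        fun k h1 h2 => absurd h1 h2, id⟩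
    | cons c cs ihcs =>
      intro st vs st' hsome
      rw [dfAList] at hsome
      cases h1 : dfA g (f+1) c st with
      | none => rw [h1] at hsome; exact absurd hsome (by simp)
      | some r1 =>
        obtain ⟨v1, st1⟩ := r1
        rw [h1] at hsome
        dsimp only at hsome
        cases h2 : dfAList g (f+1) cs st1 with
        | none => rw [h2] at hsome; exact absurd hsome (by simp)
        | some r2 =>
          obtain ⟨vs2, st2⟩ := r2
          rw [h2] at hsome
          simp only [Option.some.injEq, Prod.mk.injEq] at hsome
          obtain ⟨hvs, hst⟩ := hsome
          obtain ⟨pers1, hval1, hsz1, hnode1, hchain1, hnd1⟩ := hA c st v1 st1 h1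
          obtain ⟨pers2, hmap2, hsz2, hnode2, hchain2, hnd2⟩ := ihcs st1 vs2 st2 h2
          subst hst
          refine ⟨?_, ?_, ?_, ?_, ?_, ?_⟩
          · intro k w h; exact pers2 k w (pers1 k w h)
          · rw [← hvs, hmap2]
            simp only [List.map_cons, List.cons.injEq]
            exact ⟨(PySem.Dict.getD_of_get?_eq_some st2.1 0 (pers2 c v1 hval1)).symm, trivial⟩
          · exact le_trans hsz1 hsz2
          · intro k hk1 hk2
            cases hmid : st1.1.get? k with
            | none =>
              rcases hnode2 k hmid hk2 with hm | hm
              · exact Or.inl (List.mem_cons_of_mem c hm)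
              · exact Or.inr hm
            | some w =>
              rcases hnode1 k hk1 (by rw [hmid]; simp) with hm | hm
              · exact Or.inl (by rw [hm]; exact List.mem_cons_self)
              · exact Or.inr hm
          · intro k hk1 hk2
            cases hmid : st1.1.get? k with
            | none =>
              obtain ⟨c', hc', l, hch, hlen, hlast⟩ := hchain2 k hmid hk2
              exact ⟨c', List.mem_cons_of_mem c hc', l, hch, hlen, hlast⟩
            | some w =>
              obtain ⟨l, hch, hlen, hlast⟩ := hchain1 k hk1 (by rw [hmid]; simp)
              exact ⟨c, List.mem_cons_self, l, hch, hlen, hlast⟩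
          · intro hnd; exact hnd2 (hnd1 hnd)

theorem pvA_mono (g : PySem.Dict String (List String)) : ∀ (f : Nat),
    (∀ a st r, dfA g f a st = some r → dfA g (f+1) a st = some r)
    ∧ (∀ cs st r, dfAList g f cs st = some r → dfAList g (f+1) cs st = some r) := by
  intro f
  induction f with
  | zero =>
    constructor
    · intro a st r hsome; rw [dfA] at hsome; exact absurd hsome (by simp)
    · intro cs st r hsome
      cases cs with
      | nil => rw [dfAList] at hsome ⊢; exact hsome
      | cons c cs =>
        rw [dfAList] at hsome
        rw [show dfA g 0 c st = none from by rw [dfA]] at hsome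
        simp at hsome
  | succ f ih =>
    have hA : ∀ a st r, dfA g (f+1) a st = some r → dfA g (f+1+1) a st = some r := by
      intro a st r hsome
      rw [dfA] at hsome
      rw [dfA]
      cases hget : st.1.get? a with
      | some l => rw [hget] at hsome; dsimp only at hsome ⊢; exact hsome
      | none =>
        rw [hget] at hsome
        dsimp only at hsome ⊢
        by_cases hemp : (g.getD a []).isEmpty = true
        · rw [if_pos hemp] at hsome ⊢; exact hsome
        · rw [if_neg hemp] at hsome ⊢
          cases hlist : dfAList g f (g.getD a []) st with
          | none => rw [hlist] at hsome; exact absurd hsome (by simp)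
          | some rl =>
            rw [hlist] at hsome
            rw [ih.2 _ _ _ hlist]
            exact hsome
    refine ⟨hA, ?_⟩
    intro cs
    induction cs with
    | nil => intro st r hsome; rw [dfAList] at hsome ⊢; exact hsome
    | cons c cs ihcs =>
      intro st r hsome
      rw [dfAList] at hsome ⊢
      cases h1 : dfA g (f+1) c st with
      | none => rw [h1] at hsome; exact absurd hsome (by simp)
      | some r1 =>
        obtain ⟨v1, st1⟩ := r1
        rw [h1] at hsome
        rw [hA c st (v1, st1) h1]
        dsimp only at hsome ⊢
        cases h2 : dfAList g (f+1) cs st1 with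
        | none => rw [h2] at hsome; exact absurd hsome (by simp)
        | some r2 =>
          rw [h2] at hsome
          rw [ihcs st1 r2 h2]
          exact hsome

theorem pvA_mono_le (g : PySem.Dict String (List String)) {f f' : Nat} (h : f ≤ f') :
    ∀ a st r, dfA g f a st = some r → dfA g f' a st = some r := by
  intro a st r hsome
  obtain ⟨d, rfl⟩ := Nat.exists_eq_add_of_le h
  clear h
  induction d with
  | zero => exact hsome
  | succ d ihd => exact (pvA_mono g (f + d)).1 a st r ihd

theorem pvList_total_of (g : PySem.Dict String (List String)) (F : Nat) (Q : String → Prop)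
    (hA : ∀ a st, Q a → ∃ r, dfA g F a st = some r) :
    ∀ cs st, (∀ c ∈ cs, Q c) → ∃ r, dfAList g F cs st = some r := by
  intro cs
  induction cs with
  | nil => intro st _; rw [dfAList]; exact ⟨_, rfl⟩
  | cons c cs ihcs =>
    intro st hq
    obtain ⟨⟨v1, st1⟩, h1⟩ := hA c st (hq c List.mem_cons_self)
    obtain ⟨⟨vs2, st2⟩, h2⟩ := ihcs st1 (fun c' hc' => hq c' (List.mem_cons_of_mem c hc'))
    rw [dfAList, h1]
    dsimp only
    rw [h2]
    exact ⟨_, rfl⟩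

theorem pvA_total (g : PySem.Dict String (List String)) : ∀ (h : Nat),
    ∀ a st, pvBnd g h a → ∃ r, dfA g (h+1) a st = some r := by
  intro h
  induction h with
  | zero =>
    intro a st hb
    simp only [pvBnd] at hb
    rw [dfA]
    cases hget : st.1.get? a with
    | some l => exact ⟨_, rfl⟩
    | none =>
      rw [if_pos (by rw [hb]; rfl)]
      exact ⟨_, rfl⟩
  | succ h ihh =>
    intro a st hb
    simp only [pvBnd] at hb
    rw [dfA]
    cases hget : st.1.get? a with
    | some l => exact ⟨_, rfl⟩
    | none =>
      by_cases hemp : (g.getD a []).isEmpty = true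
      · rw [if_pos hemp]; exact ⟨_, rfl⟩
      · rw [if_neg hemp]
        obtain ⟨⟨vals, stf⟩, hlist⟩ :=
          pvList_total_of g (h+1) (pvBnd g h) (fun a st hq => ihh a st hq) (g.getD a []) st hb
        rw [hlist]
        exact ⟨_, rfl⟩

-- ---- properties of the B port ----

theorem pvB_mono (g : PySem.Dict String (List String)) :
    ∀ stack f st out, loopB g stack f st = some out → loopB g stack (f+1) st = some out := by
  intro stack f st
  induction stack, f, st using loopB.induct g with
  | case1 f st => intro out h; rw [loopB] at h; rw [loopB]; exact h
  | case2 a ready rest f st hlev ih =>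
    intro out h
    rw [loopB] at h ⊢
    rw [if_pos hlev] at h ⊢
    exact ih out h
  | case3 a ready rest f st hlev children hemp ih =>
    intro out h
    rw [loopB] at h ⊢
    rw [if_neg hlev, if_pos hemp] at h ⊢
    exact ih out h
  | case4 a rest f st hlev children hemp lvl ih =>
    intro out h
    rw [loopB] at h ⊢
    rw [if_neg hlev, if_neg hemp, if_pos rfl] at h ⊢
    exact ih out h
  | case5 a ready rest st hlev children hemp hready =>
    intro out h
    rw [loopB] at h
    rw [if_neg hlev, if_neg hemp, if_neg hready] at h
    exact absurd h (by simp)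
  | case6 a ready rest st hlev children hemp hready f ih =>
    intro out h
    rw [loopB] at h ⊢
    rw [if_neg hlev, if_neg hemp, if_neg hready] at h ⊢
    exact ih out h

theorem pvB_mono_le (g : PySem.Dict String (List String)) {f f' : Nat} (h : f ≤ f') :
    ∀ stack st out, loopB g stack f st = some out → loopB g stack f' st = some out := by
  intro stack st out hsome
  obtain ⟨d, rfl⟩ := Nat.exists_eq_add_of_le h
  clear h
  induction d with
  | zero => exact hsome
  | succ d ihd => exact pvB_mono g stack (f + d) st out ihd

-- ---- simulation: one df call = stack processing of (a, False) ----

theorem pvSim_memo (g : PySem.Dict String (List String)) {a : String} {st : pvSt}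
    {rest : List (String × Bool)} {f : Nat} {out : pvSt} {l : Int}
    (hget : st.1.get? a = some l) (hrest : loopB g rest f st = some out) :
    loopB g ((a, false) :: rest) f st = some out := by
  rw [loopB, if_pos (by rw [hget]; rfl)]
  exact hrest

theorem pvSim_leaf (g : PySem.Dict String (List String)) {a : String} {st : pvSt}
    {rest : List (String × Bool)} {f : Nat} {out : pvSt}
    (hget : st.1.get? a = none) (hemp : (g.getD a []).isEmpty = true)
    (hrest : loopB g rest f
      (st.1.insert a 0, st.2.insert 0 ((st.2.getD 0 PySem.Set.empty).add a)) = some out) :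
    loopB g ((a, false) :: rest) (f + 1) st = some out := by
  rw [loopB, if_neg (by rw [hget]; simp), if_pos hemp]
  exact pvB_mono g _ f _ out hrest

theorem pvSim (g : PySem.Dict String (List String)) (hpre : pvPreG g) :
    ∀ (h : Nat), h ≤ g.size →
      ∀ (a : String) (F : Nat) (st : pvSt) (v : Int) (st' : pvSt),
        F ≤ h + 1 → pvBnd g h a → dfA g F a st = some (v, st') →
        ∀ rest f out, loopB g rest f st' = some out →
          loopB g ((a, false) :: rest) (f + (st'.1.size - st.1.size)) st = some out := by
  intro h
  induction h with
  | zero =>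
    intro _ a F st v st' hF hbnd hsome rest f out hrest
    cases F with
    | zero => rw [dfA] at hsome; exact absurd hsome (by simp)
    | succ F' =>
      rw [dfA] at hsome
      cases hget : st.1.get? a with
      | some l =>
        rw [hget] at hsome
        simp only [Option.some.injEq, Prod.mk.injEq] at hsome
        obtain ⟨rfl, rfl⟩ := hsome
        simpa using pvSim_memo g hget hrest
      | none =>
        rw [hget] at hsome
        simp only [pvBnd] at hbnd
        have hemp : (g.getD a []).isEmpty = true := by rw [hbnd]; rfl
        rw [if_pos hemp] at hsome
        simp only [Option.some.injEq, Prod.mk.injEq] at hsome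
        obtain ⟨-, hst⟩ := hsome
        subst hst
        have hΔ : (st.1.insert a 0).size - st.1.size = 1 := by
          rw [pv_size_insert_new st.1 0 hget]; omega
        show loopB g ((a, false) :: rest) (f + ((st.1.insert a 0).size - st.1.size)) st = some out
        rw [hΔ]
        exact pvSim_leaf g hget hemp hrest
  | succ h' ih =>
    intro hh a F st v st' hF hbnd hsome rest f out hrest
    cases F with
    | zero => rw [dfA] at hsome; exact absurd hsome (by simp)
    | succ F' =>
      rw [dfA] at hsome
      cases hget : st.1.get? a with
      | some l =>
        rw [hget] at hsome
        simp only [Option.some.injEq, Prod.mk.injEq] at hsome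
        obtain ⟨rfl, rfl⟩ := hsome
        simpa using pvSim_memo g hget hrest
      | none =>
        rw [hget] at hsome
        by_cases hemp : (g.getD a []).isEmpty = true
        · rw [if_pos hemp] at hsome
          simp only [Option.some.injEq, Prod.mk.injEq] at hsome
          obtain ⟨-, hst⟩ := hsome
          subst hst
          have hΔ : (st.1.insert a 0).size - st.1.size = 1 := by
            rw [pv_size_insert_new st.1 0 hget]; omega
          show loopB g ((a, false) :: rest) (f + ((st.1.insert a 0).size - st.1.size)) st = some out
          rw [hΔ]
          exact pvSim_leaf g hget hemp hrest
        · rw [if_neg hemp] at hsome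
          cases hlist : dfAList g F' (g.getD a []) st with
          | none => rw [hlist] at hsome; exact absurd hsome (by simp)
          | some r =>
            obtain ⟨vals, stf⟩ := r
            rw [hlist] at hsome
            simp only [Option.some.injEq, Prod.mk.injEq] at hsome
            obtain ⟨-, hst⟩ := hsome
            subst hst
            simp only [pvBnd] at hbnd
            -- the list simulation
            have hsl : ∀ (cs : List String), (∀ c ∈ cs, pvBnd g h' c) →
                ∀ (F₁ : Nat) (st₁ : pvSt) (vs : List Int) (stf₁ : pvSt), F₁ ≤ h' + 1 →
                  dfAList g F₁ cs st₁ = some (vs, stf₁) →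
                  ∀ tail f₁ out₁, loopB g tail f₁ stf₁ = some out₁ →
                    loopB g (cs.map (fun c => (c, false)) ++ tail)
                      (f₁ + (stf₁.1.size - st₁.1.size)) st₁ = some out₁ := by
              intro cs
              induction cs with
              | nil =>
                intro _ F₁ st₁ vs stf₁ _ hl tail f₁ out₁ htail
                rw [dfAList] at hl
                simp only [Option.some.injEq, Prod.mk.injEq] at hl
                obtain ⟨-, rfl⟩ := hl
                simpa using htail
              | cons c cs ihcs =>
                intro hb F₁ st₁ vs stf₁ hF₁ hl tail f₁ out₁ htail
                rw [dfAList] at hl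
                cases h1 : dfA g F₁ c st₁ with
                | none => rw [h1] at hl; exact absurd hl (by simp)
                | some r1 =>
                  obtain ⟨v1, st1⟩ := r1
                  rw [h1] at hl
                  dsimp only at hl
                  cases h2 : dfAList g F₁ cs st1 with
                  | none => rw [h2] at hl; exact absurd hl (by simp)
                  | some r2 =>
                    obtain ⟨vs2, stf2⟩ := r2
                    rw [h2] at hl
                    simp only [Option.some.injEq, Prod.mk.injEq] at hl
                    obtain ⟨-, hst2⟩ := hl
                    subst hst2
                    have hs1 : st₁.1.size ≤ st1.1.size :=
                      ((pvA_main g F₁).1 c st₁ v1 st1 h1).2.2.1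
                    have hs2 : st1.1.size ≤ stf2.1.size :=
                      ((pvA_main g F₁).2 cs st1 vs2 stf2 h2).2.2.1
                    have step1 := ihcs (fun c' hc' => hb c' (List.mem_cons_of_mem c hc'))
                      F₁ st1 vs2 stf2 hF₁ h2 tail f₁ out₁ htail
                    have step2 := ih (by omega) c F₁ st₁ v1 st1 hF₁
                      (hb c List.mem_cons_self) h1
                      (cs.map (fun c => (c, false)) ++ tail)
                      (f₁ + (stf2.1.size - st1.1.size)) out₁ step1
                    have harith : f₁ + (stf2.1.size - st1.1.size) + (st1.1.size - st₁.1.size)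
                        = f₁ + (stf2.1.size - st₁.1.size) := by omega
                    rw [harith] at step2
                    simpa using step2
            -- a is still unleveled after the children have been processed
            have hnot : stf.1.get? a = none := by
              cases hq : stf.1.get? a with
              | none => rfl
              | some w =>
                exfalso
                obtain ⟨c, hcmem, l, hch, hlen, hlast⟩ :=
                  ((pvA_main g F').2 (g.getD a []) st vals stf hlist).2.2.2.2.1 a hget
                    (by rw [hq]; simp)
                exact pv_cycle_absurd g hpre (x := a) (l := c :: l) ⟨hcmem, hch⟩ (by simp)
                  (by rw [pvLast_cons]; exact hlast)
                  (by simp only [List.length_cons]; omega)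
            have hmap : vals = (g.getD a []).map (fun c => stf.1.getD c 0) :=
              ((pvA_main g F').2 (g.getD a []) st vals stf hlist).2.1
            have hsz : st.1.size ≤ stf.1.size :=
              ((pvA_main g F').2 (g.getD a []) st vals stf hlist).2.2.1
            -- the (a, true) finalisation step
            have htrue : loopB g ((a, true) :: rest) f stf = some out := by
              rw [loopB, if_neg (by rw [hnot]; simp), if_neg hemp, if_pos rfl]
              rw [← hmap]
              exact hrest
            have hrun := hsl (g.getD a []) hbnd F' st vals stf (by omega) hlist
              ((a, true) :: rest) f out htrue
            have hΔ : (stf.1.insert a (1 + (PySem.List.max? vals (fun v => v)).getD 0)).size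
                - st.1.size = (stf.1.size - st.1.size) + 1 := by
              rw [pv_size_insert_new stf.1 _ hnot]
              omega
            show loopB g ((a, false) :: rest)
              (f + ((stf.1.insert a (1 + (PySem.List.max? vals (fun v => v)).getD 0)).size
                - st.1.size)) st = some out
            rw [hΔ]
            rw [loopB, if_neg (by rw [hget]; simp), if_neg hemp,
              if_neg (by simp : ¬ (false = true))]
            have hfe : f + (stf.1.size - st.1.size + 1) = (f + (stf.1.size - st.1.size)) + 1 := by
              omega
            rw [hfe]
            exact hrun

-- ---- assembling the top level ----

theorem pv_collect_eq (nm : PySem.Dict Int (PySem.Set String)) :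
    ∀ (f : Nat) (i : Int), collectA nm f i = collectB nm f i := by
  intro f
  induction f with
  | zero => intro i; rw [collectA, collectB]
  | succ f ihf =>
    intro i
    rw [collectA, collectB]
    cases hq : nm.get? i with
    | none =>
      rw [if_neg]
      rw [PySem.Dict.contains_eq_isSome_get?, hq]
      simp
    | some sset =>
      rw [if_pos (by rw [PySem.Dict.contains_eq_isSome_get?, hq]; rfl)]
      rw [PySem.Dict.getD_of_get?_eq_some nm PySem.Set.empty hq, ihf]

theorem pv_size_le_nodes (g : PySem.Dict String (List String)) (d : PySem.Dict String Int)
    (hnd : d.keys.Nodup) (hsub : ∀ k ∈ d.keys, k ∈ pvNodes g) :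
    d.size ≤ (pvNodes g).length := by
  rw [← pv_keys_len]
  exact (List.Nodup.subperm hnd hsub).length_le

theorem pv_main (graph : List (String × List String)) (hpre : Pre_sort_topologically graph) :
    sort_topologically graph = sort_topologically_alt graph := by
  rw [sort_topologically, sort_topologically_alt]
  have hpg : pvPreG (PySem.Dict.ofList graph) := hpre
  generalize hgdef : PySem.Dict.ofList graph = g at *
  have hnd : g.keys.Nodup := by rw [← hgdef]; exact PySem.Dict.nodup_keys_ofList graph
  have hksub : ∀ k ∈ g.keys, k ∈ pvNodes g := by
    intro k hk
    simp only [pvNodes, PySem.List.mem_dedup, List.mem_append]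
    exact Or.inl hk
  have hszN : g.size ≤ (pvNodes g).length := by
    rw [← pv_keys_len]
    exact (List.Nodup.subperm hnd hksub).length_le
  set N := (PySem.List.dedup (g.keys ++ g.values.flatten)).length with hN
  have hNnodes : N = (pvNodes g).length := rfl
  -- one root step: A's df call equals B's stack run, and the invariant is preserved
  have hstep : ∀ a ∈ g.keys, ∀ st : pvSt, st.1.keys.Nodup →
      (∀ k ∈ st.1.keys, k ∈ pvNodes g) →
      (match dfA g (N+2) a st with | some r => r.2 | none => st)
          = (loopB g [(a, false)] (N+1) st).getD st
      ∧ (match dfA g (N+2) a st with | some r => r.2 | none => st).1.keys.Nodup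
      ∧ (∀ k ∈ (match dfA g (N+2) a st with | some r => r.2 | none => st).1.keys,
          k ∈ pvNodes g) := by
    intro a ha st hstnd hstsub
    have hbnd := pv_bnd_all g hpg a
    obtain ⟨⟨v, st'⟩, hs0⟩ := pvA_total g g.size a st hbnd
    have hsA : dfA g (N+2) a st = some (v, st') :=
      pvA_mono_le g (by omega) a st (v, st') hs0
    have hPA := (pvA_main g (g.size+1)).1 a st v st' hs0
    have hnd' : st'.1.keys.Nodup := hPA.2.2.2.2.2 hstnd
    have hsub' : ∀ k ∈ st'.1.keys, k ∈ pvNodes g := by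
      intro k hk
      have hk' : st'.1.get? k ≠ none := by
        intro hq0
        rw [PySem.Dict.get?_eq_none_iff_not_mem_keys] at hq0
        exact hq0 hk
      cases hq : st.1.get? k with
      | some w =>
        apply hstsub
        rw [← PySem.Dict.contains_iff_mem_keys, PySem.Dict.contains_eq_isSome_get?, hq]
        rfl
      | none =>
        rcases hPA.2.2.2.1 k hq hk' with rfl | hm
        · exact hksub k ha
        · simp only [pvNodes, PySem.List.mem_dedup, List.mem_append]
          exact Or.inr hm
    have hsz' : st'.1.size ≤ N := by
      rw [hNnodes]
      exact pv_size_le_nodes g st'.1 hnd' hsub'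
    have hnil : loopB g [] 0 st' = some st' := by rw [loopB]
    have hsim := pvSim g hpg g.size (le_refl _) a (g.size+1) st v st'
      (by omega) hbnd hs0 [] 0 st' hnil
    have hB : loopB g [(a, false)] (N+1) st = some st' := by
      apply pvB_mono_le g (f := 0 + (st'.1.size - st.1.size)) (by omega) _ _ _ hsim
    rw [hsA, hB]
    exact ⟨rfl, hnd', hsub'⟩
  -- fold the per-root step over the keys
  have hfold : ∀ (ks : List String), (∀ k ∈ ks, k ∈ g.keys) → ∀ st : pvSt,
      st.1.keys.Nodup → (∀ k ∈ st.1.keys, k ∈ pvNodes g) →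
      ks.foldl (fun st a => match dfA g (N+2) a st with | some r => r.2 | none => st) st
        = ks.foldl (fun st a => (loopB g [(a, false)] (N+1) st).getD st) st := by
    intro ks
    induction ks with
    | nil => intro _ st _ _; rfl
    | cons a ks ihks =>
      intro hks st hstnd hstsub
      obtain ⟨heq, hnd', hsub'⟩ := hstep a (hks a List.mem_cons_self) st hstnd hstsub
      simp only [List.foldl_cons]
      rw [← heq]
      exact ihks (fun k hk => hks k (List.mem_cons_of_mem a hk))
        (match dfA g (N+2) a st with | some r => r.2 | none => st) hnd' hsub'
  have hstates := hfold g.keys (fun k hk => hk) (PySem.Dict.empty, PySem.Dict.empty)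
    (by simp [PySem.Dict.keys_empty]) (by simp [PySem.Dict.keys_empty])
  rw [hstates]
  exact pv_collect_eq _ _ _

-- ===== VERDICT (by name: the statement is the Claim_ definition above) =====
theorem sort_topologically_spec : Claim_equal_sort_topologically := by
  intro graph _ hpre
  unfold Spec_sort_topologically
  exact pv_main graph hpre
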